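-- pv_equiv track=rewrite | github.com/rand/cc-experiments | skills/protocols/protobuf-schemas/resources/scripts/analyze_schema_compatibility.py | _is_compatible_type_change
-- ===== SOURCE A (Python) =====
-- def _is_compatible_type_change(old_type: str, new_type: str) -> bool:
--     """Check if type change is wire-compatible"""
--     # Compatible type changes (same wire type)
--     compatible_groups = [
--         {"int32", "uint32", "int64", "uint64", "bool"},
--         {"sint32", "sint64"},
--         {"fixed32", "sfixed32", "float"},
--         {"fixed64", "sfixed64", "double"},
--         {"string", "bytes"}
--     ]
--
--     for group in compatible_groups:
--         if old_type in group and new_type in group: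
--             return True
--
--     return False
-- ===== SOURCE B (Python) =====
-- _GROUPS = [
--     ("int32", "uint32", "int64", "uint64", "bool"),
--     ("sint32", "sint64"),
--     ("fixed32", "sfixed32", "float"),
--     ("fixed64", "sfixed64", "double"),
--     ("string", "bytes"),
-- ]
-- _TYPE_TO_GROUP = {t: i for i, group in enumerate(_GROUPS) for t in group}
--
--
-- def _is_compatible_type_change(old_type: str, new_type: str) -> bool:
--     """Check if type change is wire-compatible"""
--     return old_type in _TYPE_TO_GROUP and _TYPE_TO_GROUP[old_type] == _TYPE_TO_GROUP.get(new_type)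
-- ===== Notes on version B (the rewrite author's own statement) =====
-- stated objective: idiomatic
-- what changed: Replaces the loop over five sets (two membership tests per set) by a type-name-to-group-id dict built once, then a single containment check plus two lookups and an equality comparison.
import Mathlib
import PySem

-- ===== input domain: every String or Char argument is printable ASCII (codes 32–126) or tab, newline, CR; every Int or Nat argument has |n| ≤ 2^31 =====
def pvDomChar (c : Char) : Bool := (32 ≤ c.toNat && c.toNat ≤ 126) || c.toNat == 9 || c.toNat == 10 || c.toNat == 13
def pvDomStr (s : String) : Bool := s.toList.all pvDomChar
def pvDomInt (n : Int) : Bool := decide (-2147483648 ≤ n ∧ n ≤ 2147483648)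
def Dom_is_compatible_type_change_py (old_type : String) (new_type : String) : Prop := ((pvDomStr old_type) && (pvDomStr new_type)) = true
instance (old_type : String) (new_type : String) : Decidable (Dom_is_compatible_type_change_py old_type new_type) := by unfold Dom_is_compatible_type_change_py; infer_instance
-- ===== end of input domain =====

-- B replaces A's loop over five sets (two membership scans per set) by a dict from
-- type name to group id built once, plus two lookups and a comparison (idiomatic).

-- ===== PORT A =====
def pvGroupsA : List (PySem.Set String) :=
  [PySem.Set.ofList ["int32", "uint32", "int64", "uint64", "bool"],
   PySem.Set.ofList ["sint32", "sint64"],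
   PySem.Set.ofList ["fixed32", "sfixed32", "float"],
   PySem.Set.ofList ["fixed64", "sfixed64", "double"],
   PySem.Set.ofList ["string", "bytes"]]

-- the 'for group in …: if …: return True' loop with early return
def pvLoopA (old_type new_type : String) : List (PySem.Set String) → Bool
  | [] => false
  | g :: gs =>
    if PySem.Set.contains g old_type && PySem.Set.contains g new_type then true
    else pvLoopA old_type new_type gs

def is_compatible_type_change_py (old_type : String) (new_type : String) : Bool :=
  pvLoopA old_type new_type pvGroupsA

-- ===== PORT B =====
def pvGroupsB : List (List String) :=
  [["int32", "uint32", "int64", "uint64", "bool"],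
   ["sint32", "sint64"],
   ["fixed32", "sfixed32", "float"],
   ["fixed64", "sfixed64", "double"],
   ["string", "bytes"]]

-- {t: i for i, group in enumerate(_GROUPS) for t in group}
def pvTypeToGroup : PySem.Dict String Int :=
  (PySem.List.enumerate pvGroupsB).foldl
    (fun d ig => ig.2.foldl (fun d t => d.insert t ig.1) d) PySem.Dict.empty

-- 'old in d and d[old] == d.get(new)': under the contains guard, d[old] is the
-- some-value of get?, so comparing the two Options is exact.
def is_compatible_type_change_py_alt (old_type : String) (new_type : String) : Bool :=
  pvTypeToGroup.contains old_type &&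
    (pvTypeToGroup.get? old_type == pvTypeToGroup.get? new_type)

-- ===== PRECONDITION & SPEC =====
def Spec_is_compatible_type_change_py (old_type : String) (new_type : String) (out : Bool) : Prop := out = is_compatible_type_change_py_alt old_type new_type
instance (old_type : String) (new_type : String) (out : Bool) : Decidable (Spec_is_compatible_type_change_py old_type new_type out) := by unfold Spec_is_compatible_type_change_py; infer_instance

-- ===== CLAIM (what is proved, stated in full; the proofs are below) =====
def Claim_equal_is_compatible_type_change_py : Prop := ∀ (old_type : String) (new_type : String), Dom_is_compatible_type_change_py old_type new_type → Spec_is_compatible_type_change_py old_type new_type (is_compatible_type_change_py old_type new_type)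

-- ===== LEMMAS AND PROOFS =====
-- exhaustive case split on a string against the 15 type names (classical tautology)
lemma pvCases (s : String) : s = "int32" ∨ s = "uint32" ∨ s = "int64" ∨ s = "uint64" ∨ s = "bool" ∨ s = "sint32" ∨ s = "sint64" ∨ s = "fixed32" ∨ s = "sfixed32" ∨ s = "float" ∨ s = "fixed64" ∨ s = "sfixed64" ∨ s = "double" ∨ s = "string" ∨ s = "bytes" ∨ (s ≠ "int32" ∧ s ≠ "uint32" ∧ s ≠ "int64" ∧ s ≠ "uint64" ∧ s ≠ "bool" ∧ s ≠ "sint32" ∧ s ≠ "sint64" ∧ s ≠ "fixed32" ∧ s ≠ "sfixed32" ∧ s ≠ "float" ∧ s ≠ "fixed64" ∧ s ≠ "sfixed64" ∧ s ≠ "double" ∧ s ≠ "string" ∧ s ≠ "bytes") := by tauto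

-- the dict comprehension evaluated: the literal table
lemma pvTab : pvTypeToGroup = PySem.Dict.mk
  [("int32",(0:Int)),("uint32",0),("int64",0),("uint64",0),("bool",0),("sint32",1),("sint64",1),
   ("fixed32",2),("sfixed32",2),("float",2),("fixed64",3),("sfixed64",3),("double",3),
   ("string",4),("bytes",4)] := by decide

-- a name outside the table has no entry in B's dict
lemma pvUnknown_get? (s : String) (h : s ≠ "int32" ∧ s ≠ "uint32" ∧ s ≠ "int64" ∧ s ≠ "uint64" ∧ s ≠ "bool" ∧ s ≠ "sint32" ∧ s ≠ "sint64" ∧ s ≠ "fixed32" ∧ s ≠ "sfixed32" ∧ s ≠ "float" ∧ s ≠ "fixed64" ∧ s ≠ "sfixed64" ∧ s ≠ "double" ∧ s ≠ "string" ∧ s ≠ "bytes") :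
    pvTypeToGroup.get? s = none := by
  obtain ⟨h1, h2, h3, h4, h5, h6, h7, h8, h9, h10, h11, h12, h13, h14, h15⟩ := h
  rw [pvTab]
  simp [PySem.Dict.get?_mk_cons, beq_iff_eq, Ne.symm h1, Ne.symm h2, Ne.symm h3, Ne.symm h4, Ne.symm h5, Ne.symm h6, Ne.symm h7, Ne.symm h8, Ne.symm h9, Ne.symm h10, Ne.symm h11, Ne.symm h12, Ne.symm h13, Ne.symm h14, Ne.symm h15]
  rfl

lemma pvUnknown_contains (s : String) (h : s ≠ "int32" ∧ s ≠ "uint32" ∧ s ≠ "int64" ∧ s ≠ "uint64" ∧ s ≠ "bool" ∧ s ≠ "sint32" ∧ s ≠ "sint64" ∧ s ≠ "fixed32" ∧ s ≠ "sfixed32" ∧ s ≠ "float" ∧ s ≠ "fixed64" ∧ s ≠ "sfixed64" ∧ s ≠ "double" ∧ s ≠ "string" ∧ s ≠ "bytes") :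
    pvTypeToGroup.contains s = false := by
  obtain ⟨h1, h2, h3, h4, h5, h6, h7, h8, h9, h10, h11, h12, h13, h14, h15⟩ := h
  rw [pvTab]
  simp [beq_iff_eq, Ne.symm h1, Ne.symm h2, Ne.symm h3, Ne.symm h4, Ne.symm h5, Ne.symm h6, Ne.symm h7, Ne.symm h8, Ne.symm h9, Ne.symm h10, Ne.symm h11, Ne.symm h12, Ne.symm h13, Ne.symm h14, Ne.symm h15]

-- A returns false as soon as either argument lies in no group
lemma pvUnknown_A_right (s : String) (h : s ≠ "int32" ∧ s ≠ "uint32" ∧ s ≠ "int64" ∧ s ≠ "uint64" ∧ s ≠ "bool" ∧ s ≠ "sint32" ∧ s ≠ "sint64" ∧ s ≠ "fixed32" ∧ s ≠ "sfixed32" ∧ s ≠ "float" ∧ s ≠ "fixed64" ∧ s ≠ "sfixed64" ∧ s ≠ "double" ∧ s ≠ "string" ∧ s ≠ "bytes") : ∀ o, is_compatible_type_change_py o s = false := by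
  obtain ⟨h1, h2, h3, h4, h5, h6, h7, h8, h9, h10, h11, h12, h13, h14, h15⟩ := h
  intro o
  simp [is_compatible_type_change_py, pvGroupsA, pvLoopA, PySem.Set.ofList, PySem.Set.add,
        PySem.Set.contains, List.foldl, h1, h2, h3, h4, h5, h6, h7, h8, h9, h10, h11, h12, h13, h14, h15]

lemma pvUnknown_A_left (s : String) (h : s ≠ "int32" ∧ s ≠ "uint32" ∧ s ≠ "int64" ∧ s ≠ "uint64" ∧ s ≠ "bool" ∧ s ≠ "sint32" ∧ s ≠ "sint64" ∧ s ≠ "fixed32" ∧ s ≠ "sfixed32" ∧ s ≠ "float" ∧ s ≠ "fixed64" ∧ s ≠ "sfixed64" ∧ s ≠ "double" ∧ s ≠ "string" ∧ s ≠ "bytes") : ∀ n, is_compatible_type_change_py s n = false := by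
  obtain ⟨h1, h2, h3, h4, h5, h6, h7, h8, h9, h10, h11, h12, h13, h14, h15⟩ := h
  intro n
  simp [is_compatible_type_change_py, pvGroupsA, pvLoopA, PySem.Set.ofList, PySem.Set.add,
        PySem.Set.contains, List.foldl, h1, h2, h3, h4, h5, h6, h7, h8, h9, h10, h11, h12, h13, h14, h15]

-- B returns false as soon as either argument lies outside the dict
lemma pvUnknown_alt_right (s : String) (h : s ≠ "int32" ∧ s ≠ "uint32" ∧ s ≠ "int64" ∧ s ≠ "uint64" ∧ s ≠ "bool" ∧ s ≠ "sint32" ∧ s ≠ "sint64" ∧ s ≠ "fixed32" ∧ s ≠ "sfixed32" ∧ s ≠ "float" ∧ s ≠ "fixed64" ∧ s ≠ "sfixed64" ∧ s ≠ "double" ∧ s ≠ "string" ∧ s ≠ "bytes") : ∀ o, is_compatible_type_change_py_alt o s = false := by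
  intro o
  unfold is_compatible_type_change_py_alt
  rw [pvUnknown_get? s h, PySem.Dict.contains_eq_isSome_get?]
  cases pvTypeToGroup.get? o <;> simp

lemma pvUnknown_alt_left (s : String) (h : s ≠ "int32" ∧ s ≠ "uint32" ∧ s ≠ "int64" ∧ s ≠ "uint64" ∧ s ≠ "bool" ∧ s ≠ "sint32" ∧ s ≠ "sint64" ∧ s ≠ "fixed32" ∧ s ≠ "sfixed32" ∧ s ≠ "float" ∧ s ≠ "fixed64" ∧ s ≠ "sfixed64" ∧ s ≠ "double" ∧ s ≠ "string" ∧ s ≠ "bytes") : ∀ n, is_compatible_type_change_py_alt s n = false := by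
  intro n
  unfold is_compatible_type_change_py_alt
  rw [pvUnknown_contains s h]
  simp


-- ===== VERDICT (by name: the statement is the Claim_ definition above) =====
theorem is_compatible_type_change_py_spec : Claim_equal_is_compatible_type_change_py := by
  intro o n _
  unfold Spec_is_compatible_type_change_py
  rcases pvCases o with ho|ho|ho|ho|ho|ho|ho|ho|ho|ho|ho|ho|ho|ho|ho|ho
  all_goals first
    | (rw [pvUnknown_A_left o ho n, pvUnknown_alt_left o ho n])
    | (subst ho
       rcases pvCases n with hn|hn|hn|hn|hn|hn|hn|hn|hn|hn|hn|hn|hn|hn|hn|hn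
       all_goals first
         | (rw [pvUnknown_A_right n hn, pvUnknown_alt_right n hn])
         | (subst hn; decide))
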